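-- pv_equiv track=rewrite | github.com/SansPapyrus683/usaco-solutions | src/official/o2020/jan/bronze/dejaVu/deja_vu.py | peak_height
-- ===== SOURCE A (Python) =====
-- def peak_total(peak, end):
--     return peak * (peak + 1) // 2 + ((peak - 1 - end + 1) * (end + peak - 1)) // 2
--
-- def peak_height(dist, end):  # given dist and end, find the maximum peak so we <= the dist
--     lowerBound = 1
--     upperBound = dist
--     height_ = -1
--     while lowerBound <= upperBound:  # binsearch for the peak
--         toSearch = (lowerBound + upperBound) // 2
--         if peak_total(toSearch, end) <= dist:
--             height_ = toSearch
--             lowerBound = toSearch + 1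
--         else:
--             upperBound = toSearch - 1
--     return height_
-- ===== SOURCE B (Python) =====
-- def _isqrt(n):
--     # Newton's method floor square root, n >= 1 (no math import in the module)
--     x = n
--     y = (x + n // x) // 2
--     while y < x:
--         x = y
--         y = (x + n // x) // 2
--     return x
--
--
-- def peak_height(dist, end):
--     # peak_total(p, end) simplifies exactly to p*p - end*(end-1)//2, so the
--     # largest peak in [1, dist] with total <= dist is min(dist, isqrt(total))
--     # where total = dist + end*(end-1)//2, or -1 if no such peak exists.
--     total = dist + end * (end - 1) // 2
--     if dist < 1 or total < 1:
--         return -1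
--     return min(dist, _isqrt(total))
-- ===== Notes on version B (the rewrite author's own statement) =====
-- stated objective: alternative
-- what changed: Replaces the binary search over [1,dist] by an exact closed form: peak_total(p,end) equals p*p - end*(end-1)//2, so the answer is min(dist, isqrt(dist + end*(end-1)//2)) (or -1), with the integer square root computed by Newton's method since the module imports nothing.
import Mathlib
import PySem

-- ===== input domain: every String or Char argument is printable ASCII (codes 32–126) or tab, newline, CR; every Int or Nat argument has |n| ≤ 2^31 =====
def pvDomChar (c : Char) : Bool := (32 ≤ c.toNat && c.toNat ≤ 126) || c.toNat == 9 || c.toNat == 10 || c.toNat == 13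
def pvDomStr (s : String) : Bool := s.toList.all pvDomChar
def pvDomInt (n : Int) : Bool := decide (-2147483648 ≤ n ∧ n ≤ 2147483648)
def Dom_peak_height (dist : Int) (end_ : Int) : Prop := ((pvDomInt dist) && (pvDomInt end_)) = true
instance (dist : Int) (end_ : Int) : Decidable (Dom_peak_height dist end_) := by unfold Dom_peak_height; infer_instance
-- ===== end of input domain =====

-- ===== PORT A =====
def peak_total (peak : Int) (end_ : Int) : Int :=
  PySem.Int.floordiv (peak * (peak + 1)) 2 +
    PySem.Int.floordiv ((peak - 1 - end_ + 1) * (end_ + peak - 1)) 2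

-- the while-loop of A, state (lowerBound, upperBound, height_)
def peakLoop (dist : Int) (end_ : Int) (lo hi h : Int) : Int :=
  if hle : lo <= hi then
    let toSearch := PySem.Int.floordiv (lo + hi) 2
    if peak_total toSearch end_ <= dist then
      peakLoop dist end_ (toSearch + 1) hi toSearch
    else
      peakLoop dist end_ lo (toSearch - 1) h
  else h
termination_by (hi + 1 - lo).toNat
decreasing_by
  · have := PySem.Int.floordiv_two_mid_bounds hle; omega
  · have := PySem.Int.floordiv_two_mid_bounds hle; omega

def peak_height (dist : Int) (end_ : Int) : Int :=
  peakLoop dist end_ 1 dist (-1)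

-- ===== PORT B =====
-- Newton's-method integer square root loop of Source B; the '1 <= x' conjunct is a
-- totality guard only (in every reachable call x >= 1, where Python's n // x is defined).
def pvIsqrtLoop (n : Int) (x : Int) : Int :=
  let y := PySem.Int.floordiv (x + PySem.Int.floordiv n x) 2
  if _hlt : y < x ∧ 1 <= x then pvIsqrtLoop n y else x
termination_by x.toNat
decreasing_by omega

def peak_height_alt (dist : Int) (end_ : Int) : Int :=
  let total := dist + PySem.Int.floordiv (end_ * (end_ - 1)) 2
  if dist < 1 ∨ total < 1 then -1
  else min dist (pvIsqrtLoop total total)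

-- ===== PRECONDITION & SPEC =====
def Spec_peak_height (dist : Int) (end_ : Int) (out : Int) : Prop := out = peak_height_alt dist end_
instance (dist : Int) (end_ : Int) (out : Int) : Decidable (Spec_peak_height dist end_ out) := by unfold Spec_peak_height; infer_instance

-- ===== CLAIM (what is proved, stated in full; the proofs are below) =====
def Claim_equal_peak_height : Prop := ∀ (dist : Int) (end_ : Int), Dom_peak_height dist end_ → Spec_peak_height dist end_ (peak_height dist end_)

-- ===== LEMMAS AND PROOFS =====

-- "total <= dist" region characterisation: r is -1 and no peak in [1,dist] fits,
-- or r is the largest peak in [1,dist] with p*p <= T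
def PHSpec (dist T r : Int) : Prop :=
  (r = -1 ∧ ∀ p : Int, 1 ≤ p → p ≤ dist → ¬ (p * p ≤ T)) ∨
  (1 ≤ r ∧ r ≤ dist ∧ r * r ≤ T ∧ ∀ p : Int, r < p → p ≤ dist → ¬ (p * p ≤ T))

theorem floordiv_double (a : Int) : PySem.Int.floordiv (2 * a) 2 = a := by
  rw [PySem.Int.floordiv_eq_iff_of_pos (by norm_num)]; omega

-- peak_total(p, e) <= dist  ↔  p*p <= dist + e*(e-1)//2
theorem peak_total_iff (p e dist : Int) :
    peak_total p e ≤ dist ↔ p * p ≤ dist + PySem.Int.floordiv (e * (e - 1)) 2 := by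
  obtain ⟨a, ha⟩ := Int.even_mul_succ_self p
  obtain ⟨b, hb⟩ := Int.even_mul_succ_self (p - 1)
  obtain ⟨c, hc⟩ := Int.even_mul_succ_self (e - 1)
  have h1 : p * (p + 1) = 2 * a := by linarith
  have h2 : (p - 1 - e + 1) * (e + p - 1) = 2 * (b - c) := by linear_combination hb - hc
  have h3 : e * (e - 1) = 2 * c := by linear_combination hc
  have h4 : p * p + p = 2 * a := by linear_combination h1
  have h5 : p * p - p = 2 * b := by linear_combination hb
  have hpp : p * p = a + b := by linarith
  unfold peak_total
  rw [h1, h2, h3, floordiv_double, floordiv_double, floordiv_double]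
  omega

theorem peakLoop_PHSpec (dist end_ T : Int)
    (hT : T = dist + PySem.Int.floordiv (end_ * (end_ - 1)) 2) :
    ∀ n : Nat, ∀ lo hi h : Int, (hi + 1 - lo).toNat = n →
      1 ≤ lo → hi ≤ dist →
      (∀ p : Int, hi < p → p ≤ dist → ¬ (p * p ≤ T)) →
      ((h = -1 ∧ lo = 1) ∨ (h = lo - 1 ∧ 1 ≤ h ∧ h ≤ dist ∧ h * h ≤ T)) →
      PHSpec dist T (peakLoop dist end_ lo hi h) := by
  intro n
  induction n using Nat.strong_induction_on with
  | _ n IH =>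
    intro lo hi h hn hlo hhd hhi hinv
    rw [peakLoop]
    by_cases hle : lo ≤ hi
    · simp only [hle, dite_true]
      have hmid := PySem.Int.floordiv_two_mid_bounds hle
      set mid := PySem.Int.floordiv (lo + hi) 2 with hm
      by_cases hq : peak_total mid end_ ≤ dist
      · simp only [hq, if_true]
        have hQ : mid * mid ≤ T := by rw [hT]; exact (peak_total_iff mid end_ dist).mp hq
        exact IH (hi + 1 - (mid + 1)).toNat (by omega) _ _ _ rfl (by omega) hhd hhi
          (Or.inr ⟨by omega, by omega, by omega, hQ⟩)
      · simp only [hq, if_false]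
        have hnQ : ¬ (mid * mid ≤ T) := by rw [hT]; exact fun hx => hq ((peak_total_iff mid end_ dist).mpr (hT ▸ hx))
        refine IH (mid - 1 + 1 - lo).toNat (by omega) _ _ _ rfl hlo (by omega) ?_ hinv
        intro p hp1 hp2 hpQ
        by_cases hph : p ≤ hi
        · have h1m : 1 ≤ mid := by omega
          exact hnQ (by nlinarith)
        · exact hhi p (by omega) hp2 hpQ
    · simp only [hle, dite_false]
      rcases hinv with ⟨h1, h2⟩ | ⟨h1, h2, h3, h4⟩
      · exact Or.inl ⟨h1, fun p hp1 hp2 => hhi p (by omega) hp2⟩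
      · exact Or.inr ⟨h2, h3, h4, fun p hp1 hp2 => hhi p (by omega) hp2⟩

-- Newton's iteration, started at or above the true square root, reaches it
theorem pvIsqrtLoop_eq_sqrt (n : Int) (hn : 1 ≤ n) :
    ∀ m : Nat, ∀ x : Int, x.toNat = m → (Nat.sqrt n.toNat : Int) ≤ x →
      pvIsqrtLoop n x = (Nat.sqrt n.toNat : Int) := by
  have hnt : (n.toNat : Int) = n := Int.toNat_of_nonneg (by omega)
  set s : Int := (Nat.sqrt n.toNat : Int) with hs
  have hs2 : s * s ≤ n := by
    have h := Nat.sqrt_le' n.toNat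
    rw [pow_two] at h
    calc s * s = ((Nat.sqrt n.toNat * Nat.sqrt n.toNat : Nat) : Int) := by push_cast [hs]; ring
    _ ≤ (n.toNat : Int) := by exact_mod_cast h
    _ = n := hnt
  have hs1 : 1 ≤ s := by
    have : 0 < Nat.sqrt n.toNat := Nat.sqrt_pos.mpr (by omega)
    rw [hs]; exact_mod_cast this
  have hlt : n < (s + 1) * (s + 1) := by
    have h := Nat.lt_succ_sqrt' n.toNat
    rw [pow_two] at h
    calc n = (n.toNat : Int) := hnt.symm
    _ < ((Nat.succ (Nat.sqrt n.toNat) * Nat.succ (Nat.sqrt n.toNat) : Nat) : Int) := by exact_mod_cast h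
    _ = (s + 1) * (s + 1) := by push_cast [hs, Nat.succ_eq_add_one]; ring
  intro m
  induction m using Nat.strong_induction_on with
  | _ m IH =>
    intro x hm hsx
    have hx1 : 1 ≤ x := by omega
    have hqb := (PySem.Int.floordiv_eq_iff_of_pos (a := n) (b := x) (by omega)).mp rfl
    set q : Int := PySem.Int.floordiv n x with hqdef
    have hamgm : s * 2 ≤ x + q := by nlinarith [hqb.1, hqb.2, sq_nonneg (x - s)]
    have hy : s ≤ PySem.Int.floordiv (x + q) 2 :=
      (PySem.Int.le_floordiv_iff_mul_le (by norm_num)).mpr hamgm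
    rw [pvIsqrtLoop]
    simp only [← hqdef]
    by_cases hcond : PySem.Int.floordiv (x + q) 2 < x ∧ 1 ≤ x
    · simp only [hcond]
      exact IH (PySem.Int.floordiv (x + q) 2).toNat (by omega) _ rfl hy
    · simp only [hcond, dite_false]
      have hyx : x ≤ PySem.Int.floordiv (x + q) 2 := by
        rcases not_and_or.mp hcond with h | h
        · omega
        · omega
      have hxq : x * 2 ≤ x + q := (PySem.Int.le_floordiv_iff_mul_le (by norm_num)).mp hyx
      have hxx : x * x ≤ n := by nlinarith [hqb.1]
      have : x ≤ s := by nlinarith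
      omega

theorem alt_PHSpec (dist end_ : Int) :
    PHSpec dist (dist + PySem.Int.floordiv (end_ * (end_ - 1)) 2) (peak_height_alt dist end_) := by
  set c : Int := PySem.Int.floordiv (end_ * (end_ - 1)) 2 with hc
  unfold peak_height_alt
  simp only [← hc]
  by_cases hneg : dist < 1 ∨ dist + c < 1
  · simp only [hneg, if_true]
    refine Or.inl ⟨rfl, fun p hp1 hp2 hpQ => ?_⟩
    rcases hneg with h | h
    · omega
    · nlinarith
  · simp only [hneg, if_false]
    have hd1 : 1 ≤ dist := by omega
    have ht1 : 1 ≤ dist + c := by omega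
    set t : Int := dist + c with ht
    set s : Int := (Nat.sqrt t.toNat : Int) with hs
    have hnt : (t.toNat : Int) = t := Int.toNat_of_nonneg (by omega)
    have hs2 : s * s ≤ t := by
      have h := Nat.sqrt_le' t.toNat
      rw [pow_two] at h
      calc s * s = ((Nat.sqrt t.toNat * Nat.sqrt t.toNat : Nat) : Int) := by push_cast [hs]; ring
      _ ≤ (t.toNat : Int) := by exact_mod_cast h
      _ = t := hnt
    have hs1 : 1 ≤ s := by
      have : 0 < Nat.sqrt t.toNat := Nat.sqrt_pos.mpr (by omega)
      rw [hs]; exact_mod_cast this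
    have hlt : t < (s + 1) * (s + 1) := by
      have h := Nat.lt_succ_sqrt' t.toNat
      rw [pow_two] at h
      calc t = (t.toNat : Int) := hnt.symm
      _ < ((Nat.succ (Nat.sqrt t.toNat) * Nat.succ (Nat.sqrt t.toNat) : Nat) : Int) := by exact_mod_cast h
      _ = (s + 1) * (s + 1) := by push_cast [hs, Nat.succ_eq_add_one]; ring
    have hst : s ≤ t := by nlinarith
    rw [pvIsqrtLoop_eq_sqrt t ht1 t.toNat t rfl hst, ← hs]
    refine Or.inr ⟨by omega, by omega, ?_, ?_⟩
    · have hms : min dist s ≤ s := by omega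
      have hm1 : 1 ≤ min dist s := by omega
      nlinarith
    · intro p hp1 hp2 hpQ
      have hps : s < p := by omega
      nlinarith

theorem PHSpec_unique (dist T r1 r2 : Int) (h1 : PHSpec dist T r1) (h2 : PHSpec dist T r2) :
    r1 = r2 := by
  rcases h1 with ⟨e1, f1⟩ | ⟨a1, b1, c1, d1⟩ <;> rcases h2 with ⟨e2, f2⟩ | ⟨a2, b2, c2, d2⟩
  · omega
  · exact absurd c2 (f1 r2 a2 b2)
  · exact absurd c1 (f2 r1 a1 b1)
  · rcases lt_trichotomy r1 r2 with h | h | h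
    · exact absurd c2 (d1 r2 h b2)
    · exact h
    · exact absurd c1 (d2 r1 h b1)

-- ===== VERDICT (by name: the statement is the Claim_ definition above) =====
theorem peak_height_spec : Claim_equal_peak_height := by
  intro dist end_ _
  unfold Spec_peak_height peak_height
  exact PHSpec_unique dist (dist + PySem.Int.floordiv (end_ * (end_ - 1)) 2) _ _
    (peakLoop_PHSpec dist end_ _ rfl (dist + 1 - 1).toNat 1 dist (-1) rfl (by omega) le_rfl
      (fun p hp1 hp2 => by omega) (Or.inl ⟨rfl, rfl⟩))
    (alt_PHSpec dist end_)
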